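-- pv_equiv track=rewrite | github.com/patrick-g-zhang/cFrontEnd | src/FrontEnd.py | pos_syl_in_phrase
-- ===== SOURCE A (Python) =====
-- def pos_syl_in_phrase(char_index, phrase_map):
--     phrase_index = phrase_map[char_index]
--     phrase_index_list = []
--     for key, value in phrase_map.items():
--         if value == phrase_index:
--             phrase_index_list.append(key)
--     phrase_len = len(phrase_index_list)
--     fw_syl_pos = phrase_index_list.index(char_index) + 1
--     bw_syl_pos = phrase_len - fw_syl_pos + 1
--     return fw_syl_pos, bw_syl_pos, phrase_index, phrase_len
-- ===== SOURCE B (Python) =====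
-- def pos_syl_in_phrase(char_index, phrase_map):
--     phrase_index = phrase_map[char_index]
--     items = list(phrase_map.items())
--     pos = next(i for i, (k, _) in enumerate(items) if k == char_index)
--     fw_syl_pos = 1 + sum(1 for _, v in items[:pos] if v == phrase_index)
--     bw_syl_pos = 1 + sum(1 for _, v in items[pos + 1:] if v == phrase_index)
--     return fw_syl_pos, bw_syl_pos, phrase_index, fw_syl_pos + bw_syl_pos - 1
-- ===== Notes on version B (the rewrite author's own statement) =====
-- stated objective: alternative
-- what changed: Instead of building the list of same-phrase keys and locating char_index in it with .index, B finds char_index's position in the item sequence, splits the items there, counts same-phrase entries independently in the two slices, and derives the phrase length arithmetically as fw+bw-1 rather than measuring it.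
import Mathlib
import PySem

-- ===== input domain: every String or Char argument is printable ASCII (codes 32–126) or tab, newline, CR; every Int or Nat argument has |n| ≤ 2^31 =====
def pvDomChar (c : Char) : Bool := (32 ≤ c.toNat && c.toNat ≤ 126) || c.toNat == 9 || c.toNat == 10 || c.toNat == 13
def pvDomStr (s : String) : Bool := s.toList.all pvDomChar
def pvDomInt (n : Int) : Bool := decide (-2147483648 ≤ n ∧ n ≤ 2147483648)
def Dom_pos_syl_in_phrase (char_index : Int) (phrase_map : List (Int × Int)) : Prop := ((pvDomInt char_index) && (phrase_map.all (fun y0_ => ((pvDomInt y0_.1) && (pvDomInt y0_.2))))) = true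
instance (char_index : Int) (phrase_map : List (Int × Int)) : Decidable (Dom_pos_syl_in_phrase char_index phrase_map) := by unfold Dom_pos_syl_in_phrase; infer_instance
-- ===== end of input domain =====

-- B splits the item sequence at char_index's position and counts same-phrase entries in the
-- two slices independently, deriving phrase_len as fw+bw-1; A builds the key list and uses
-- len/.index. Objective: alternative decomposition, same cost.

-- ===== PORT A =====
def pos_syl_in_phrase (char_index : Int) (phrase_map : List (Int × Int)) : Int × Int × Int × Int :=
  match (PySem.Dict.mk phrase_map).get? char_index with
  | none => (0, 0, 0, 0)   -- unreachable under Pre_ (Python raises KeyError)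
  | some phrase_index =>
    let phrase_index_list :=
      phrase_map.foldl (fun acc kv => if kv.2 = phrase_index then acc ++ [kv.1] else acc) []
    let phrase_len : Int := phrase_index_list.length
    match PySem.List.index? phrase_index_list char_index with
    | none => (0, 0, 0, 0)  -- unreachable under Pre_ (Python raises ValueError)
    | some i =>
      let fw_syl_pos : Int := (i : Int) + 1
      let bw_syl_pos : Int := phrase_len - fw_syl_pos + 1
      (fw_syl_pos, bw_syl_pos, phrase_index, phrase_len)

-- ===== PORT B =====
def pos_syl_in_phrase_alt (char_index : Int) (phrase_map : List (Int × Int)) : Int × Int × Int × Int :=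
  match (PySem.Dict.mk phrase_map).get? char_index with
  | none => (0, 0, 0, 0)   -- unreachable under Pre_ (Python raises KeyError)
  | some phrase_index =>
    match phrase_map.findIdx? (fun kv => kv.1 = char_index) with
    | none => (0, 0, 0, 0)  -- unreachable under Pre_ (Python's next() would raise StopIteration)
    | some pos =>
      let fw_syl_pos : Int := 1 + ((phrase_map.take pos).countP (fun kv => kv.2 = phrase_index) : Int)
      let bw_syl_pos : Int := 1 + ((phrase_map.drop (pos + 1)).countP (fun kv => kv.2 = phrase_index) : Int)
      (fw_syl_pos, bw_syl_pos, phrase_index, fw_syl_pos + bw_syl_pos - 1)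

-- ===== PRECONDITION & SPEC =====
-- Pre_ excludes exactly the inputs where the Python A raises KeyError: char_index not a key of phrase_map.
def Pre_pos_syl_in_phrase (char_index : Int) (phrase_map : List (Int × Int)) : Prop :=
  char_index ∈ phrase_map.map Prod.fst
instance (char_index : Int) (phrase_map : List (Int × Int)) : Decidable (Pre_pos_syl_in_phrase char_index phrase_map) := by unfold Pre_pos_syl_in_phrase; infer_instance
def pvWitness_pos_syl_in_phrase : Int × (List (Int × Int)) := (2, [(1, 0), (2, 0), (3, 1)])

def Spec_pos_syl_in_phrase (char_index : Int) (phrase_map : List (Int × Int)) (out : Int × Int × Int × Int) : Prop := out = pos_syl_in_phrase_alt char_index phrase_map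
instance (char_index : Int) (phrase_map : List (Int × Int)) (out : Int × Int × Int × Int) : Decidable (Spec_pos_syl_in_phrase char_index phrase_map out) := by unfold Spec_pos_syl_in_phrase; infer_instance

-- ===== CLAIM (what is proved, stated in full; the proofs are below) =====
def Claim_equal_pos_syl_in_phrase : Prop := ∀ (char_index : Int) (phrase_map : List (Int × Int)), Dom_pos_syl_in_phrase char_index phrase_map → Pre_pos_syl_in_phrase char_index phrase_map → Spec_pos_syl_in_phrase char_index phrase_map (pos_syl_in_phrase char_index phrase_map)

-- ===== LEMMAS AND PROOFS =====

-- Under Pre_, phrase_map splits at the FIRST pair keyed char_index; that pair's value is what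
-- the dict lookup returns, and findIdx? points exactly there.
theorem key_split (ci : Int) (pm : List (Int × Int)) (h : ci ∈ pm.map Prod.fst) :
    ∃ pre pi suf, pm = pre ++ (ci, pi) :: suf ∧ (∀ kv ∈ pre, kv.1 ≠ ci) ∧
      (PySem.Dict.mk pm).get? ci = some pi ∧
      pm.findIdx? (fun kv => kv.1 = ci) = some pre.length := by
  induction pm with
  | nil => simp at h
  | cons kv rest ih =>
    obtain ⟨k, v⟩ := kv
    by_cases hk : k = ci
    · subst hk
      exact ⟨[], v, rest, by simp, by simp, by simp [PySem.Dict.get?_mk_cons],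
        by simp [List.findIdx?_cons]⟩
    · have hmem : ci ∈ rest.map Prod.fst := by
        simp only [List.map_cons, List.mem_cons] at h
        rcases h with h1 | h1
        · exact absurd h1.symm hk
        · exact h1
      obtain ⟨pre, pi, suf, heq, hpre, hget, hidx⟩ := ih hmem
      refine ⟨(k, v) :: pre, pi, suf, by simp [heq], ?_, ?_, ?_⟩
      · intro kv hkv
        rcases List.mem_cons.mp hkv with h1 | h1
        · subst h1; exact hk
        · exact hpre kv h1
      · rw [PySem.Dict.get?_mk_cons, if_neg (by simp [hk])]; exact hget
      · simp [List.findIdx?_cons, hk, hidx]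

-- ===== VERDICT (by name: the statement is the Claim_ definition above) =====
theorem pos_syl_in_phrase_spec : Claim_equal_pos_syl_in_phrase := by
  intro ci pm _ hpre
  obtain ⟨pre, pi, suf, heq, hprekeys, hget, hidx⟩ := key_split ci pm hpre
  subst heq
  have hfold : (pre ++ (ci, pi) :: suf).foldl
      (fun acc kv => if kv.2 = pi then acc ++ [kv.1] else acc) [] =
      ((pre ++ (ci, pi) :: suf).filter (fun kv => kv.2 = pi)).map Prod.fst := by
    simpa using PySem.List.foldl_append_ite (fun kv => kv.2 = pi) Prod.fst (pre ++ (ci, pi) :: suf) []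
  have hfilter : (pre ++ (ci, pi) :: suf).filter (fun kv => kv.2 = pi) =
      pre.filter (fun kv => kv.2 = pi) ++ (ci, pi) :: suf.filter (fun kv => kv.2 = pi) := by
    rw [List.filter_append, List.filter_cons_of_pos (by simp)]
  have hnotmem : ci ∉ (pre.filter (fun kv => kv.2 = pi)).map Prod.fst := by
    intro hmem
    obtain ⟨kv, hkv, hfst⟩ := List.mem_map.mp hmem
    exact hprekeys kv (List.mem_of_mem_filter hkv) hfst
  have hindex : PySem.List.index?
      ((pre.filter (fun kv => kv.2 = pi)).map Prod.fst ++
        ci :: (suf.filter (fun kv => kv.2 = pi)).map Prod.fst) ci =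
      some (pre.filter (fun kv => kv.2 = pi)).length := by
    apply (PySem.List.index?_eq_some_iff _ _ _).mpr
    exact ⟨(pre.filter (fun kv => kv.2 = pi)).map Prod.fst,
      (suf.filter (fun kv => kv.2 = pi)).map Prod.fst, by simp, by simp, hnotmem⟩
  have hdrop : (pre ++ (ci, pi) :: suf).drop (pre.length + 1) = suf := by simp
  simp only [Spec_pos_syl_in_phrase, pos_syl_in_phrase, pos_syl_in_phrase_alt, hget, hidx,
    hfold, hfilter, List.map_append, List.map_cons, hindex, List.take_left, hdrop,
    List.length_append, List.length_map, List.length_cons, ← List.countP_eq_length_filter]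
  refine Prod.ext ?_ (Prod.ext ?_ (Prod.ext rfl ?_)) <;> push_cast <;> ring
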